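-- pv_equiv track=rewrite | github.com/dfacoet/aoc-python | 2016/2016-20_solution.py | part2
-- ===== SOURCE A (Python) =====
-- from typing import Literal
--
-- def part2(puzzle_input: dict[Literal["left", "right"], list[int]]) -> int:
--     endpoints = sorted(
--         [(v, -1) for v in puzzle_input["left"]]
--         + [(v, 1) for v in puzzle_input["right"]]
--     )
--     level = 0
--     total = 0
--     for k, (v, change) in enumerate(endpoints):
--         level += change
--         if level == 0:
--             if k == len(endpoints) - 1:
--                 # last interval
--                 total += 2**32 - v - 1
--             elif (gap := endpoints[k + 1][0] - v - 1) > 0: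
--                 total += gap
--     return total
-- ===== SOURCE B (Python) =====
-- def part2(puzzle_input):
--     lc = {}
--     for v in puzzle_input["left"]:
--         lc[v] = lc.get(v, 0) + 1
--     rc = {}
--     for v in puzzle_input["right"]:
--         rc[v] = rc.get(v, 0) + 1
--     vs = sorted(set(lc) | set(rc))
--     total = 0
--     bal = 0
--     for i, v in enumerate(vs):
--         bal += rc.get(v, 0) - lc.get(v, 0)
--         if bal == 0:
--             nxt = vs[i + 1] if i + 1 < len(vs) else 2 ** 32
--             total += nxt - v - 1
--     return total
-- ===== Notes on version B (the rewrite author's own statement) =====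
-- stated objective: alternative
-- what changed: A pools all endpoints into one tagged (value, +/-1) tuple list, sorts it and sweeps a signed level counter with index lookahead; B instead builds value->count dictionaries for the left and right endpoints, walks the sorted distinct values once and tracks the running balance of right-minus-left counts, so duplicates are collapsed and no tagged tuple list or per-event index arithmetic exists.
import Mathlib
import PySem

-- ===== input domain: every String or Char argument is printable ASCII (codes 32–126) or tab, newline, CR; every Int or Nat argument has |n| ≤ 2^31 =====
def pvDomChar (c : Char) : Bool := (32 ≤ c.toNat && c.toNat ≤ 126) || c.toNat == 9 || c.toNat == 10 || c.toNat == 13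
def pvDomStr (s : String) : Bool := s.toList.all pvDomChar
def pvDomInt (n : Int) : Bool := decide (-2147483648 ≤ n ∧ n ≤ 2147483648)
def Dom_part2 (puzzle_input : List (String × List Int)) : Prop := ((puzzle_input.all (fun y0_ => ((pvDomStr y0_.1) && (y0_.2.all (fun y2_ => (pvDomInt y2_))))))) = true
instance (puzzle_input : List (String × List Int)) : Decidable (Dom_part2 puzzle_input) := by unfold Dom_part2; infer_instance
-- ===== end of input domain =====

-- B replaces A's pooled tagged-endpoint sweep by value→count dictionaries and a single pass over
-- the sorted distinct endpoint values (objective: alternative; same asymptotic cost).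

-- ===== PORT A =====
-- the body of A's for-loop, closed over the sorted endpoint list (state = (level, total))
def part2Body (endpoints : List (Int × Int)) (st : Int × Int) (kv : Int × (Int × Int)) : Int × Int :=
  let level := st.1 + kv.2.2
  let total :=
    if level = 0 then
      if kv.1 = (endpoints.length : Int) - 1 then st.2 + (2 ^ 32 - kv.2.1 - 1)
      else
        let gap := (PySem.List.pyGetD endpoints (kv.1 + 1) (0, 0)).1 - kv.2.1 - 1
        if gap > 0 then st.2 + gap else st.2
    else st.2
  (level, total)

def part2 (puzzle_input : List (String × List Int)) : Int :=
  let left := (PySem.Dict.get? (PySem.Dict.mk puzzle_input) "left").getD []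
  let right := (PySem.Dict.get? (PySem.Dict.mk puzzle_input) "right").getD []
  let endpoints := PySem.List.sorted2
    (left.map (fun v => (v, (-1 : Int))) ++ right.map (fun v => (v, (1 : Int))))
    (fun p => p.1) (fun p => p.2)
  ((PySem.List.enumerate endpoints).foldl (part2Body endpoints) (0, 0)).2

-- ===== PORT B =====
-- the body of B's for-loop over the distinct sorted values (state = (bal, total))
def part2AltBody (lc rc : PySem.Dict Int Int) (vs : List Int) (st : Int × Int) (iv : Int × Int) : Int × Int :=
  let bal := st.1 + rc.getD iv.2 0 - lc.getD iv.2 0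
  let total :=
    if bal = 0 then
      let nxt := if iv.1 + 1 < (vs.length : Int) then PySem.List.pyGetD vs (iv.1 + 1) 0 else 2 ^ 32
      st.2 + nxt - iv.2 - 1
    else st.2
  (bal, total)

def part2_alt (puzzle_input : List (String × List Int)) : Int :=
  let lc := ((PySem.Dict.get? (PySem.Dict.mk puzzle_input) "left").getD []).foldl
    (fun d x => d.insert x (d.getD x 0 + 1)) PySem.Dict.empty
  let rc := ((PySem.Dict.get? (PySem.Dict.mk puzzle_input) "right").getD []).foldl
    (fun d x => d.insert x (d.getD x 0 + 1)) PySem.Dict.empty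
  let vs := PySem.List.sorted
    (PySem.Set.union (PySem.Set.ofList lc.keys) (PySem.Set.ofList rc.keys)) (fun x => x)
  ((PySem.List.enumerate vs).foldl (part2AltBody lc rc vs) (0, 0)).2

-- ===== PRECONDITION & SPEC =====
-- Pre_ excludes exactly the inputs whose dict lacks a "left" or "right" key: Python A raises KeyError there.
def Pre_part2 (puzzle_input : List (String × List Int)) : Prop :=
  "left" ∈ puzzle_input.map Prod.fst ∧ "right" ∈ puzzle_input.map Prod.fst
instance (puzzle_input : List (String × List Int)) : Decidable (Pre_part2 puzzle_input) := by unfold Pre_part2; infer_instance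

def pvWitness_part2 : (List (String × List Int)) := [("left", [0, 10]), ("right", [3, 12])]

def Spec_part2 (puzzle_input : List (String × List Int)) (out : Int) : Prop := out = part2_alt puzzle_input
instance (puzzle_input : List (String × List Int)) (out : Int) : Decidable (Spec_part2 puzzle_input out) := by unfold Spec_part2; infer_instance

-- ===== CLAIM (what is proved, stated in full; the proofs are below) =====
def Claim_equal_part2 : Prop := ∀ (puzzle_input : List (String × List Int)), Dom_part2 puzzle_input → Pre_part2 puzzle_input → Spec_part2 puzzle_input (part2 puzzle_input)

-- ===== LEMMAS AND PROOFS =====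

def nxtOf : List Int → Int
  | [] => 2 ^ 32
  | w :: _ => w

def headGap (v total : Int) : List (Int × Int) → Int
  | [] => total + (2 ^ 32 - v - 1)
  | (w, _) :: _ => if w - v - 1 > 0 then total + (w - v - 1) else total

def ALoop (level total : Int) : List (Int × Int) → Int
  | [] => total
  | (v, c) :: rest =>
    let level' := level + c
    let total' := if level' = 0 then headGap v total rest else total
    ALoop level' total' rest

def BLoop (cl cr : Int → Int) (bal total : Int) : List Int → Int
  | [] => total
  | v :: rest =>
    let bal' := bal + cr v - cl v
    let total' := if bal' = 0 then total + nxtOf rest - v - 1 else total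
    BLoop cl cr bal' total' rest

def grp (cl cr : Int → Nat) (v : Int) : List (Int × Int) :=
  List.replicate (cl v) (v, -1) ++ List.replicate (cr v) (v, 1)

lemma ALoop_cons (level total v c : Int) (rest : List (Int × Int)) :
    ALoop level total ((v, c) :: rest)
      = ALoop (level + c) (if level + c = 0 then headGap v total rest else total) rest := rfl

lemma BLoop_cons (cl cr : Int → Int) (bal total v : Int) (rest : List Int) :
    BLoop cl cr bal total (v :: rest)
      = BLoop cl cr (bal + cr v - cl v)
          (if bal + cr v - cl v = 0 then total + nxtOf rest - v - 1 else total) rest := rfl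

lemma ALoop_step_same (v c c' : Int) (zs : List (Int × Int)) (level total : Int) :
    ALoop level total ((v, c) :: (v, c') :: zs) = ALoop (level + c) total ((v, c') :: zs) := by
  rw [ALoop_cons]
  congr 1
  show (if level + c = 0 then (if v - v - 1 > 0 then total + (v - v - 1) else total) else total) = total
  split_ifs <;> omega

lemma ALoop_rep (v c : Int) : ∀ (k : Nat) (c' : Int) (zs : List (Int × Int)) (level total : Int),
    ALoop level total (List.replicate k (v, c) ++ (v, c') :: zs)
      = ALoop (level + k * c) total ((v, c') :: zs) := by
  intro k
  induction k with
  | zero => intro c' zs level total; simp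
  | succ k ih =>
    intro c' zs level total
    have hstep : ∀ L, (∃ d ws, L = (v, d) :: ws) →
        ALoop level total ((v, c) :: L) = ALoop (level + c) total L := by
      rintro L ⟨d, ws, rfl⟩
      exact ALoop_step_same v c d ws level total
    rw [List.replicate_succ, List.cons_append, hstep]
    · rw [ih]
      congr 1
      push_cast
      ring
    · rcases k with _ | k
      · exact ⟨c', zs, by simp⟩
      · exact ⟨c, List.replicate k (v, c) ++ (v, c') :: zs, by rw [List.replicate_succ, List.cons_append]⟩

lemma ALoop_repL (v c : Int) (k : Nat) (L : List (Int × Int)) (h : ∃ c' zs, L = (v, c') :: zs)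
    (level total : Int) :
    ALoop level total (List.replicate k (v, c) ++ L) = ALoop (level + k * c) total L := by
  obtain ⟨c', zs, rfl⟩ := h
  exact ALoop_rep v c k c' zs level total

lemma ALoop_group (m n : Nat) (hmn : 1 ≤ m + n) (v : Int) (T : List (Int × Int)) (level total : Int) :
    ALoop level total ((List.replicate m (v, -1) ++ List.replicate n (v, 1)) ++ T)
      = ALoop (level - m + n)
          (if level - (m : Int) + n = 0 then headGap v total T else total) T := by
  rcases n with _ | n
  · rcases m with _ | m
    · omega
    · rw [List.replicate_zero, List.append_nil, List.replicate_succ', List.append_assoc,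
        List.singleton_append, ALoop_repL v (-1) m ((v, -1) :: T) ⟨-1, T, rfl⟩, ALoop_cons]
      have h1 : level + (m : Int) * (-1) + (-1) = level - ((m + 1 : Nat) : Int) + ((0 : Nat) : Int) := by
        push_cast; ring
      rw [h1]
  · have hsplit : (List.replicate m (v, (-1 : Int)) ++ List.replicate (n + 1) (v, (1 : Int))) ++ T
        = List.replicate m (v, (-1 : Int)) ++ (List.replicate n (v, (1 : Int)) ++ (v, 1) :: T) := by
      rw [List.replicate_succ', List.append_assoc, List.append_assoc, List.singleton_append]
    have hhead : ∃ c' zs, List.replicate n (v, (1 : Int)) ++ (v, 1) :: T = (v, c') :: zs := by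
      rcases n with _ | n
      · exact ⟨1, T, by simp⟩
      · exact ⟨1, List.replicate n (v, 1) ++ (v, 1) :: T, by rw [List.replicate_succ, List.cons_append]⟩
    rw [hsplit, ALoop_repL v (-1) m _ hhead, ALoop_repL v 1 n ((v, 1) :: T) ⟨1, T, rfl⟩, ALoop_cons]
    have h1 : level + (m : Int) * (-1) + (n : Int) * 1 + 1 = level - (m : Int) + ((n + 1 : Nat) : Int) := by
      push_cast; ring
    rw [h1]

lemma grp_head (cl cr : Int → Nat) (v : Int) (h : 1 ≤ cl v + cr v) :
    ∃ c' zs, grp cl cr v = (v, c') :: zs := by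
  unfold grp
  rcases hm : cl v with _ | m
  · rcases hn : cr v with _ | n
    · omega
    · exact ⟨1, List.replicate n (v, 1), by simp [List.replicate_succ]⟩
  · exact ⟨-1, List.replicate m (v, -1) ++ List.replicate (cr v) (v, 1), by simp [List.replicate_succ]⟩

lemma contrib_eq (cl cr : Int → Nat) (v C total : Int) (rest : List Int)
    (hw : ∀ w r', rest = w :: r' → v < w ∧ 1 ≤ cl w + cr w) :
    (if C = 0 then headGap v total (rest.flatMap (grp cl cr)) else total)
      = (if C = 0 then total + nxtOf rest - v - 1 else total) := by
  rcases rest with _ | ⟨w, rest'⟩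
  · rw [List.flatMap_nil]
    split_ifs with h0
    · show total + (2 ^ 32 - v - 1) = total + nxtOf [] - v - 1
      rw [nxtOf]; ring
    · rfl
  · obtain ⟨hvw, hcw⟩ := hw w rest' rfl
    obtain ⟨c', zs, hzs⟩ := grp_head cl cr w hcw
    rw [List.flatMap_cons, hzs, List.cons_append]
    split_ifs with h0
    · show (if w - v - 1 > 0 then total + (w - v - 1) else total) = total + nxtOf (w :: rest') - v - 1
      rw [nxtOf]
      split_ifs with hg <;> omega
    · rfl

lemma ALoop_eq_BLoop (cl cr : Int → Nat) : ∀ (vs : List Int), vs.Pairwise (· < ·) →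
    (∀ v ∈ vs, 1 ≤ cl v + cr v) → ∀ (bal total : Int),
    ALoop bal total (vs.flatMap (grp cl cr))
      = BLoop (fun v => ((cl v : Nat) : Int)) (fun v => ((cr v : Nat) : Int)) bal total vs := by
  intro vs
  induction vs with
  | nil => intro _ _ bal total; rfl
  | cons v rest ih =>
    intro hpw hcnt bal total
    rw [List.flatMap_cons]
    rw [show grp cl cr v ++ rest.flatMap (grp cl cr)
        = (List.replicate (cl v) (v, -1) ++ List.replicate (cr v) (v, 1)) ++ rest.flatMap (grp cl cr) from rfl]
    rw [ALoop_group (cl v) (cr v) (hcnt v (by simp)) v _ bal total]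
    rw [BLoop_cons]
    have hbal : bal - ((cl v : Nat) : Int) + ((cr v : Nat) : Int)
        = bal + ((cr v : Nat) : Int) - ((cl v : Nat) : Int) := by ring
    rw [hbal]
    rw [contrib_eq cl cr v _ total rest
      (fun w r' hr => ⟨List.rel_of_pairwise_cons hpw (by rw [hr]; simp),
        hcnt w (by rw [hr]; simp)⟩)]
    exact ih hpw.of_cons (fun u hu => hcnt u (List.mem_cons_of_mem _ hu)) _ _

def lb (a b : Int × Int) : Bool :=
  decide (a.1 < b.1) || (!decide (b.1 < a.1) && decide (a.2 < b.2))

lemma insertBy_nil (x : Int × Int) : PySem.List.insertBy lb x [] = [x] := rfl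

lemma insertBy_cons (x y : Int × Int) (ys : List (Int × Int)) :
    PySem.List.insertBy lb x (y :: ys)
      = if lb x y then x :: y :: ys else y :: PySem.List.insertBy lb x ys := rfl


lemma lb_trans_neg (a b c : Int × Int) (h1 : lb a b = true) (h2 : lb c b = false) : lb c a = false := by
  simp only [lb, Bool.or_eq_true, decide_eq_true_eq, Bool.and_eq_true, Bool.not_eq_eq_eq_not,
    Bool.or_eq_false_iff, Bool.and_eq_false_iff, decide_eq_false_iff_not, Bool.not_eq_false',
    decide_eq_true_eq, Bool.not_eq_true', decide_eq_false_iff_not] at *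
  rcases a with ⟨a1, a2⟩; rcases b with ⟨b1, b2⟩; rcases c with ⟨c1, c2⟩
  simp_all
  omega

lemma lb_false_of_true (a b : Int × Int) (h : lb a b = true) : lb b a = false := by
  rcases a with ⟨a1, a2⟩; rcases b with ⟨b1, b2⟩
  simp only [lb, Bool.or_eq_true, decide_eq_true_eq, Bool.and_eq_true, Bool.not_eq_eq_eq_not,
    Bool.or_eq_false_iff, Bool.and_eq_false_iff, decide_eq_false_iff_not, Bool.not_eq_false',
    Bool.not_eq_true', decide_eq_false_iff_not] at *
  simp_all
  omega

lemma lb_antisymm (a b : Int × Int) (h1 : lb a b = false) (h2 : lb b a = false) : a = b := by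
  rcases a with ⟨a1, a2⟩; rcases b with ⟨b1, b2⟩
  simp only [lb, Bool.or_eq_false_iff, Bool.and_eq_false_iff, decide_eq_false_iff_not,
    Bool.not_eq_false', decide_eq_true_eq, Bool.not_eq_true', Prod.mk.injEq] at *
  omega

lemma pairwise_insertBy (x : Int × Int) : ∀ (ys : List (Int × Int)),
    ys.Pairwise (fun a b => lb b a = false)
    → (PySem.List.insertBy lb x ys).Pairwise (fun a b => lb b a = false) := by
  intro ys
  induction ys with
  | nil => intro _; simp [insertBy_nil]
  | cons y ys ih =>
    intro h
    rw [insertBy_cons]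
    rcases List.pairwise_cons.mp h with ⟨hy, hys⟩
    by_cases hxy : lb x y = true
    · rw [if_pos hxy]
      refine List.pairwise_cons.mpr ⟨?_, h⟩
      intro z hz
      rcases List.mem_cons.mp hz with rfl | hz
      · exact lb_false_of_true x z hxy
      · exact lb_trans_neg x y z hxy (hy z hz)
    · rw [if_neg hxy]
      refine List.pairwise_cons.mpr ⟨?_, ih hys⟩
      intro z hz
      rcases (PySem.List.mem_insertBy lb x z ys).mp hz with rfl | hz
      · exact Bool.eq_false_iff.mpr hxy
      · exact hy z hz

lemma pairwise_foldl_insertBy (xs : List (Int × Int)) : ∀ (acc : List (Int × Int)),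
    acc.Pairwise (fun a b => lb b a = false)
    → (xs.foldl (fun acc x => PySem.List.insertBy lb x acc) acc).Pairwise (fun a b => lb b a = false) := by
  induction xs with
  | nil => intro acc h; exact h
  | cons x xs ih =>
    intro acc h
    exact ih _ (pairwise_insertBy x acc h)

lemma sorted2_eq_of_perm_of_pairwise (xs ys : List (Int × Int)) (hperm : ys.Perm xs)
    (hpw : ys.Pairwise (fun a b => lb b a = false)) :
    PySem.List.sorted2 xs (fun p => p.1) (fun p => p.2) = ys := by
  have hS : PySem.List.sorted2 xs (fun p => p.1) (fun p => p.2)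
      = xs.foldl (fun acc x => PySem.List.insertBy lb x acc) [] := rfl
  have hSpw : (PySem.List.sorted2 xs (fun p => p.1) (fun p => p.2)).Pairwise
      (fun a b => lb b a = false) := by
    rw [hS]
    exact pairwise_foldl_insertBy xs [] (by simp)
  have hSperm : (PySem.List.sorted2 xs (fun p => p.1) (fun p => p.2)).Perm ys :=
    (PySem.List.sorted2_perm xs _ _ false).trans hperm.symm
  exact List.Perm.eq_of_pairwise (fun a b _ _ h1 h2 => (lb_antisymm b a h1 h2).symm) hSpw hpw hSperm

lemma fst_mem_grp (cl cr : Int → Nat) (v : Int) (p : Int × Int) (hp : p ∈ grp cl cr v) : p.1 = v := by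
  unfold grp at hp
  rcases List.mem_append.mp hp with h | h
  · rw [List.eq_of_mem_replicate h]
  · rw [List.eq_of_mem_replicate h]

lemma grp_pairwise (cl cr : Int → Nat) (v : Int) :
    (grp cl cr v).Pairwise (fun a b => lb b a = false) := by
  unfold grp
  rw [List.pairwise_append]
  refine ⟨List.pairwise_replicate.mpr (.inr (by simp [lb])), List.pairwise_replicate.mpr (.inr (by simp [lb])), ?_⟩
  intro a ha b hb
  rw [List.eq_of_mem_replicate ha, List.eq_of_mem_replicate hb]
  simp [lb]

lemma grouped_pairwise (cl cr : Int → Nat) : ∀ (vs : List Int), vs.Pairwise (· < ·) →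
    (vs.flatMap (grp cl cr)).Pairwise (fun a b => lb b a = false) := by
  intro vs
  induction vs with
  | nil => intro _; simp
  | cons v rest ih =>
    intro hpw
    rw [List.flatMap_cons, List.pairwise_append]
    refine ⟨grp_pairwise cl cr v, ih hpw.of_cons, ?_⟩
    intro a ha b hb
    rw [List.mem_flatMap] at hb
    obtain ⟨w, hw, hbw⟩ := hb
    have h1 : a.1 = v := fst_mem_grp cl cr v a ha
    have h2 : b.1 = w := fst_mem_grp cl cr w b hbw
    have hvw : v < w := List.rel_of_pairwise_cons hpw hw
    simp [lb, h1, h2]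
    omega

lemma count_grp_ne (cl cr : Int → Nat) (w x t : Int) (hne : w ≠ x) :
    (grp cl cr w).count (x, t) = 0 := by
  rw [List.count_eq_zero]
  intro hmem
  exact hne ((fst_mem_grp cl cr w (x, t) hmem)).symm

lemma count_flatMap_zero (cl cr : Int → Nat) (x t : Int) : ∀ (vs : List Int), x ∉ vs →
    (vs.flatMap (grp cl cr)).count (x, t) = 0 := by
  intro vs
  induction vs with
  | nil => intro _; simp
  | cons w rest ih =>
    intro hx
    rw [List.flatMap_cons, List.count_append,
      count_grp_ne cl cr w x t (fun h => hx (h ▸ List.mem_cons_self)),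
      ih (fun h => hx (List.mem_cons_of_mem _ h))]

lemma count_flatMap_grp (cl cr : Int → Nat) (x t : Int) : ∀ (vs : List Int), vs.Nodup → x ∈ vs →
    (vs.flatMap (grp cl cr)).count (x, t) = (grp cl cr x).count (x, t) := by
  intro vs
  induction vs with
  | nil => intro _ h; cases h
  | cons w rest ih =>
    intro hnd hx
    rw [List.flatMap_cons, List.count_append]
    rcases List.mem_cons.mp hx with rfl | hx
    · rw [count_flatMap_zero cl cr x t rest (List.nodup_cons.mp hnd).1]
      omega
    · rw [count_grp_ne cl cr w x t (fun h => (List.nodup_cons.mp hnd).1 (h ▸ hx)),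
        ih (List.nodup_cons.mp hnd).2 hx]
      omega

lemma count_grp_self (cl cr : Int → Nat) (x t : Int) :
    (grp cl cr x).count (x, t)
      = (if t = -1 then cl x else 0) + (if t = 1 then cr x else 0) := by
  unfold grp
  rw [List.count_append, List.count_replicate, List.count_replicate]
  simp only [beq_iff_eq, Prod.mk.injEq, true_and]
  split_ifs <;> omega

lemma count_map_tag (xs : List Int) (c x t : Int) :
    (xs.map (fun v => (v, c))).count (x, t) = if t = c then xs.count x else 0 := by
  rcases eq_or_ne t c with rfl | h
  · rw [if_pos rfl]
    exact List.count_map_of_injective xs (fun v => (v, t)) (fun a b hab => (Prod.mk.injEq _ _ _ _ ▸ hab).1) x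
  · rw [if_neg h, List.count_eq_zero]
    intro hmem
    obtain ⟨v, _, hv⟩ := List.mem_map.mp hmem
    exact h ((Prod.mk.injEq _ _ _ _ ▸ hv).2.symm)

lemma grouped_perm (cl cr : Int → Nat) (left right : List Int)
    (hcl : ∀ v, cl v = left.count v) (hcr : ∀ v, cr v = right.count v)
    (vs : List Int) (hnd : vs.Nodup) (hmem : ∀ x, x ∈ vs ↔ x ∈ left ∨ x ∈ right) :
    (vs.flatMap (grp cl cr)).Perm
      (left.map (fun v => (v, (-1 : Int))) ++ right.map (fun v => (v, (1 : Int)))) := by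
  rw [List.perm_iff_count]
  intro p
  obtain ⟨x, t⟩ := p
  rw [List.count_append, count_map_tag, count_map_tag]
  by_cases hx : x ∈ vs
  · rw [count_flatMap_grp cl cr x t vs hnd hx, count_grp_self, hcl, hcr]
  · rw [count_flatMap_zero cl cr x t vs hx]
    have hxl : x ∉ left := fun h => hx ((hmem x).mpr (.inl h))
    have hxr : x ∉ right := fun h => hx ((hmem x).mpr (.inr h))
    rw [List.count_eq_zero_of_not_mem hxl, List.count_eq_zero_of_not_mem hxr]
    split_ifs <;> omega

lemma A_fold_suffix (suf : List (Int × Int)) : ∀ (pre : List (Int × Int)) (level total : Int),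
    ((PySem.List.enumerate suf (pre.length : Int)).foldl (part2Body (pre ++ suf)) (level, total)).2
      = ALoop level total suf := by
  induction suf with
  | nil => intro pre level total; rw [PySem.List.enumerate_nil, List.foldl_nil]; rfl
  | cons hd rest ih =>
    intro pre level total
    obtain ⟨v, c⟩ := hd
    rw [PySem.List.enumerate_cons, List.foldl_cons, ALoop_cons]
    have hstep : part2Body (pre ++ (v, c) :: rest) (level, total) ((pre.length : Int), (v, c))
        = (level + c, if level + c = 0 then headGap v total rest else total) := by
      unfold part2Body
      simp only
      congr 1
      by_cases h0 : level + c = 0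
      · rw [if_pos h0, if_pos h0]
        rcases rest with _ | ⟨⟨w, d⟩, rest'⟩
        · rw [if_pos (by simp)]
          rfl
        · rw [if_neg (by simp; omega)]
          have hidx : (pre.length : Int) + 1 = (((pre ++ [(v, c)]).length : Nat) : Int) := by
            simp
          have hget : PySem.List.pyGetD (pre ++ (v, c) :: (w, d) :: rest') ((pre.length : Int) + 1) (0, 0)
              = (w, d) := by
            rw [hidx, show pre ++ (v, c) :: (w, d) :: rest' = (pre ++ [(v, c)]) ++ (w, d) :: rest' by simp,
              PySem.List.pyGetD_natCast]
            simp [List.getD, List.getElem?_append_right]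
          rw [hget]
          rfl
      · rw [if_neg h0, if_neg h0]
    rw [hstep]
    have hlist : pre ++ (v, c) :: rest = (pre ++ [(v, c)]) ++ rest := by simp
    have hlen : (pre.length : Int) + 1 = (((pre ++ [(v, c)]).length : Nat) : Int) := by simp
    rw [hlist, hlen, ih]

lemma B_fold_suffix (lc rc : PySem.Dict Int Int) (suf : List Int) :
    ∀ (pre : List Int) (bal total : Int),
    ((PySem.List.enumerate suf (pre.length : Int)).foldl (part2AltBody lc rc (pre ++ suf)) (bal, total)).2
      = BLoop (fun v => lc.getD v 0) (fun v => rc.getD v 0) bal total suf := by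
  induction suf with
  | nil => intro pre bal total; rw [PySem.List.enumerate_nil, List.foldl_nil]; rfl
  | cons v rest ih =>
    intro pre bal total
    rw [PySem.List.enumerate_cons, List.foldl_cons, BLoop_cons]
    have hstep : part2AltBody lc rc (pre ++ v :: rest) (bal, total) ((pre.length : Int), v)
        = (bal + rc.getD v 0 - lc.getD v 0,
           if bal + rc.getD v 0 - lc.getD v 0 = 0 then total + nxtOf rest - v - 1 else total) := by
      unfold part2AltBody
      simp only
      congr 1
      by_cases h0 : bal + rc.getD v 0 - lc.getD v 0 = 0
      · rw [if_pos h0, if_pos h0]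
        rcases rest with _ | ⟨w, rest'⟩
        · rw [if_neg (by simp)]
          rfl
        · rw [if_pos (by simp)]
          have hidx : (pre.length : Int) + 1 = (((pre ++ [v]).length : Nat) : Int) := by simp
          have hget : PySem.List.pyGetD (pre ++ v :: w :: rest') ((pre.length : Int) + 1) 0 = w := by
            rw [hidx, show pre ++ v :: w :: rest' = (pre ++ [v]) ++ w :: rest' by simp,
              PySem.List.pyGetD_natCast]
            simp [List.getD, List.getElem?_append_right]
          rw [hget]
          rfl
      · rw [if_neg h0, if_neg h0]
    rw [hstep]
    have hlist : pre ++ v :: rest = (pre ++ [v]) ++ rest := by simp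
    have hlen : (pre.length : Int) + 1 = (((pre ++ [v]).length : Nat) : Int) := by simp
    rw [hlist, hlen, ih]

lemma A_run (E : List (Int × Int)) :
    ((PySem.List.enumerate E).foldl (part2Body E) (0, 0)).2 = ALoop 0 0 E := by
  have h := A_fold_suffix E [] 0 0
  simpa using h

lemma B_run (lc rc : PySem.Dict Int Int) (vs : List Int) :
    ((PySem.List.enumerate vs).foldl (part2AltBody lc rc vs) (0, 0)).2
      = BLoop (fun v => lc.getD v 0) (fun v => rc.getD v 0) 0 0 vs := by
  have h := B_fold_suffix lc rc vs [] 0 0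
  simpa using h

lemma main_LR (L R : List Int) :
    (let E := PySem.List.sorted2
        (L.map (fun v => (v, (-1 : Int))) ++ R.map (fun v => (v, (1 : Int))))
        (fun p => p.1) (fun p => p.2);
      ((PySem.List.enumerate E).foldl (part2Body E) (0, 0)).2)
    = (let lc := L.foldl (fun d x => d.insert x (d.getD x 0 + 1)) PySem.Dict.empty;
       let rc := R.foldl (fun d x => d.insert x (d.getD x 0 + 1)) PySem.Dict.empty;
       let vs := PySem.List.sorted
          (PySem.Set.union (PySem.Set.ofList lc.keys) (PySem.Set.ofList rc.keys)) (fun x => x);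
       ((PySem.List.enumerate vs).foldl (part2AltBody lc rc vs) (0, 0)).2) := by
  simp only [PySem.Dict.foldl_insert_getD_add_one_eq_counter, PySem.Dict.keys_counter,
    PySem.Set.ofList_ofList]
  rw [A_run, B_run]
  have hUnd : (PySem.Set.union (PySem.Set.ofList L) (PySem.Set.ofList R)).Nodup :=
    PySem.Set.nodup_union _ _ (PySem.Set.nodup_ofList L)
  set vs := PySem.List.sorted
    (PySem.Set.union (PySem.Set.ofList L) (PySem.Set.ofList R)) (fun x => x) with hvs
  have hvnd : vs.Nodup := (PySem.List.sorted_perm _ _ _).symm.nodup hUnd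
  have hvmem : ∀ x : Int, x ∈ vs ↔ x ∈ L ∨ x ∈ R := by
    intro x
    rw [hvs, PySem.List.mem_sorted]
    constructor
    · intro h
      rcases (PySem.Set.mem_union _ _ _).mp h with h | h
      · exact .inl (((PySem.Set.mem_ofList _ _).mp h))
      · exact .inr (((PySem.Set.mem_ofList _ _).mp h))
    · intro h
      refine (PySem.Set.mem_union _ _ _).mpr ?_
      rcases h with h | h
      · exact .inl (((PySem.Set.mem_ofList _ _).mpr h))
      · exact .inr (((PySem.Set.mem_ofList _ _).mpr h))
  have hple : vs.Pairwise (· ≤ ·) := PySem.List.sorted_pairwise _ _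
  have hpw : vs.Pairwise (· < ·) :=
    (hple.and hvnd).imp (fun h => lt_of_le_of_ne h.1 h.2)
  have hcnt : ∀ v ∈ vs, 1 ≤ (fun v => L.count v) v + (fun v => R.count v) v := by
    intro v hv
    rcases (hvmem v).mp hv with h | h
    · have := List.count_pos_iff.mpr h
      simp only
      omega
    · have := List.count_pos_iff.mpr h
      simp only
      omega
  rw [sorted2_eq_of_perm_of_pairwise _ _
      (grouped_perm (fun v => L.count v) (fun v => R.count v) L R
        (fun _ => rfl) (fun _ => rfl) vs hvnd hvmem)
      (grouped_pairwise _ _ vs hpw)]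
  rw [ALoop_eq_BLoop (fun v => L.count v) (fun v => R.count v) vs hpw hcnt 0 0]
  have hfl : (fun v => (PySem.Dict.counter L).getD v 0) = (fun v => ((L.count v : Nat) : Int)) :=
    funext (fun v => PySem.Dict.getD_counter L v)
  have hfr : (fun v => (PySem.Dict.counter R).getD v 0) = (fun v => ((R.count v : Nat) : Int)) :=
    funext (fun v => PySem.Dict.getD_counter R v)
  rw [hfl, hfr]

-- ===== VERDICT (by name: the statement is the Claim_ definition above) =====
theorem part2_spec : Claim_equal_part2 := by
  intro puzzle_input _ _
  exact main_LR ((PySem.Dict.get? (PySem.Dict.mk puzzle_input) "left").getD [])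
    ((PySem.Dict.get? (PySem.Dict.mk puzzle_input) "right").getD [])
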